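-- pv_equiv track=rewrite | github.com/root-aj000/DATASET_GEN | core/parser.py | _fix_colons
-- ===== SOURCE A (Python) =====
-- def _fix_colons(s: str) -> str:
--     """Fix colons inside JSON string values."""
--     result = []
--     in_str = False
--     in_val = False
--     after_c = False
--     esc = False
--
--     for c in s:
--         if esc:
--             result.append(c)
--             esc = False
--             continue
--         if c == '\\':
--             result.append(c)
--             esc = True
--             continue
--         if c == '"':
--             in_str = not in_str
--             if in_str and after_c:
--                 in_val = True
--                 after_c = False
--             elif not in_str:
--                 in_val = False
--             result.append(c)
--             continue
--         if not in_str and c == ':':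
--             after_c = True
--             result.append(c)
--             continue
--         if not in_str:
--             after_c = False
--         if in_val and c == ':':
--             result.append(' -')
--             continue
--         result.append(c)
--
--     return ''.join(result)
-- ===== SOURCE B (Python) =====
-- def _fix_colons(s: str) -> str:
--     out = []
--     i = 0
--     n = len(s)
--     in_str = False
--     in_val = False
--     after_c = False
--     while True:
--         q = s.find('"', i)
--         b = s.find('\\', i)
--         if q == -1:
--             j = n if b == -1 else b
--         elif b == -1:
--             j = q
--         else:
--             j = min(q, b)
--         chunk = s[i:j]
--         if chunk:
--             if in_str and in_val:
--                 chunk = chunk.replace(':', ' -')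
--             elif not in_str:
--                 after_c = chunk.endswith(':')
--             out.append(chunk)
--         if j == n:
--             break
--         c = s[j]
--         if c == '\\':
--             out.append(s[j:j + 2])
--             i = j + 2
--         else:
--             in_str = not in_str
--             if in_str:
--                 in_val = after_c
--                 after_c = False
--             else:
--                 in_val = False
--             out.append('"')
--             i = j + 1
--     return ''.join(out)
-- ===== Notes on version B (the rewrite author's own statement) =====
-- stated objective: faster
-- what changed: B replaces A's per-character five-flag state machine by a chunked scan that jumps straight to the next quote or backslash with str.find and handles the text in between in bulk (str.replace for the colon substitution inside value strings, endswith for the after-colon flag).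
import Mathlib
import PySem

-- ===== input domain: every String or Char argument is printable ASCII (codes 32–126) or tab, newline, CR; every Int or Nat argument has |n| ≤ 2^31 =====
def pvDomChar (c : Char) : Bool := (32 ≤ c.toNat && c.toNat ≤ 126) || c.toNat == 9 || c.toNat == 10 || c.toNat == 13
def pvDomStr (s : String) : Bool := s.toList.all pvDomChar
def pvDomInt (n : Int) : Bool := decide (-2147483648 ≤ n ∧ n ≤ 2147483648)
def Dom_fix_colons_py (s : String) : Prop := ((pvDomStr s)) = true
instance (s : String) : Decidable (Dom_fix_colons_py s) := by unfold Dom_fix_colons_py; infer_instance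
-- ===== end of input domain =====

-- B replaces A's per-character boolean state machine by a chunked scan that jumps
-- between the special characters '"' and '\' (bulk find/replace on the text in between);
-- objective: faster via bulk string operations, same return value.

-- ===== PORT A =====
-- A's for-loop as structural recursion; state = (in_str, in_val, after_c, esc),
-- the appended pieces are returned front-to-back and joined at the end.
def fixColonsALoop : List Char → Bool → Bool → Bool → Bool → List String
  | [], _, _, _, _ => []
  | c :: cs, in_str, in_val, after_c, esc =>
    if esc then String.ofList [c] :: fixColonsALoop cs in_str in_val after_c false
    else if c = '\\' then String.ofList [c] :: fixColonsALoop cs in_str in_val after_c true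
    else if c = '"' then
      let in_str' := !in_str
      if in_str' && after_c then String.ofList [c] :: fixColonsALoop cs in_str' true false false
      else if !in_str' then String.ofList [c] :: fixColonsALoop cs in_str' false after_c false
      else String.ofList [c] :: fixColonsALoop cs in_str' in_val after_c false
    else if !in_str && c = ':' then String.ofList [c] :: fixColonsALoop cs in_str in_val true false
    else
      let after_c' := if !in_str then false else after_c
      if in_val && c = ':' then " -" :: fixColonsALoop cs in_str in_val after_c' false
      else String.ofList [c] :: fixColonsALoop cs in_str in_val after_c' false

def fix_colons_py (s : String) : String :=
  PySem.Str.join "" (fixColonsALoop s.toList false false false false)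

-- ===== PORT B =====
-- Source B's while-loop: find the next '"' or '\' (j = min of the two finds, as in Source B),
-- emit the chunk before it (replaced / endswith-checked in bulk), handle the special
-- character, continue on the remainder.  `match cs.drop j` is Source B's `if j == n: break; c = s[j]`.
def fixColonsBJ (cs : List Char) : Nat :=
  match PySem.List.index? cs '"', PySem.List.index? cs '\\' with
  | none, none => cs.length
  | none, some bb => bb
  | some qq, none => qq
  | some qq, some bb => min qq bb

-- the chunk's contribution to `out` (possibly colon-replaced in bulk)
def fixColonsBChunk (chunk : List Char) (in_str in_val : Bool) : List String :=
  if chunk.isEmpty then []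
  else if in_str && in_val then [String.ofList (PySem.Chars.replace chunk [':'] [' ', '-'])]
  else [String.ofList chunk]

-- after_c after the chunk (endswith ':' check, only outside strings)
def fixColonsBAc (chunk : List Char) (in_str after_c : Bool) : Bool :=
  if !chunk.isEmpty && !in_str then PySem.Chars.endswith chunk [':'] else after_c

def fixColonsBLoop (cs : List Char) (in_str in_val after_c : Bool) : List String :=
  let j := fixColonsBJ cs
  let chunkS := fixColonsBChunk (cs.take j) in_str in_val
  let ac := fixColonsBAc (cs.take j) in_str after_c
  match _h : cs.drop j with
  | [] => chunkS
  | c :: rest =>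
    if c = '\\' then
      chunkS ++ [String.ofList (c :: rest.take 1)] ++ fixColonsBLoop (rest.drop 1) in_str in_val ac
    else if !in_str then
      chunkS ++ ["\""] ++ fixColonsBLoop rest (!in_str) ac false
    else
      chunkS ++ ["\""] ++ fixColonsBLoop rest (!in_str) false ac
termination_by cs.length
decreasing_by
  all_goals
    have h1 : (cs.drop j).length = cs.length - j := List.length_drop
    rw [_h] at h1
    simp at h1 ⊢
    omega

def fix_colons_py_alt (s : String) : String :=
  PySem.Str.join "" (fixColonsBLoop s.toList false false false)

-- ===== PRECONDITION & SPEC =====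
def Spec_fix_colons_py (s : String) (out : String) : Prop := out = fix_colons_py_alt s
instance (s : String) (out : String) : Decidable (Spec_fix_colons_py s out) := by unfold Spec_fix_colons_py; infer_instance

-- ===== CLAIM (what is proved, stated in full; the proofs are below) =====
def Claim_equal_fix_colons_py : Prop := ∀ (s : String), Dom_fix_colons_py s → Spec_fix_colons_py s (fix_colons_py s)

-- ===== LEMMAS AND PROOFS =====

-- flattened character output of a list of string pieces
def pvFlat (l : List String) : List Char := (l.map String.toList).flatten

-- the after_c flag after A has processed a chunk of non-special characters
def pvAcAfter (chunk : List Char) (ins ac : Bool) : Bool :=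
  if ins || chunk.isEmpty then ac else decide (chunk.getLast? = some ':')

-- A's output piece for one non-special character
def pvF (ins iv : Bool) (c : Char) : String :=
  if ins && iv && c = ':' then " -" else String.ofList [c]

theorem pvFlat_cons (s : String) (l : List String) :
    pvFlat (s :: l) = s.toList ++ pvFlat l := by
  simp [pvFlat]

theorem pvFlat_append (l₁ l₂ : List String) :
    pvFlat (l₁ ++ l₂) = pvFlat l₁ ++ pvFlat l₂ := by
  simp [pvFlat]

-- Chars.replace with a single-character pattern is a flatMap
theorem pvReplaceGo (a : Char) (r : List Char) :
    ∀ (fuel : Nat) (l acc : List Char), l.length ≤ fuel →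
      PySem.Chars.replace.go [a] r fuel l acc =
        acc.reverse ++ l.flatMap (fun c => if c = a then r else [c]) := by
  intro fuel
  induction fuel with
  | zero => intro l acc h; cases l with
    | nil => simp [PySem.Chars.replace.go]
    | cons c t => simp at h
  | succ n ih =>
    intro l acc h
    cases l with
    | nil => simp [PySem.Chars.replace.go]
    | cons c t =>
      simp only [PySem.Chars.replace.go]
      by_cases hc : c = a
      · subst hc
        have : [c].isPrefixOf (c :: t) = true := by simp [List.isPrefixOf]
        rw [if_pos this]
        rw [ih _ _ (by simpa using Nat.le_of_succ_le_succ h)]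
        simp
      · have : [a].isPrefixOf (c :: t) = false := by
          simp [List.isPrefixOf]; exact fun h' => (hc h'.symm).elim
        rw [if_neg (by simp [this])]
        rw [ih _ _ (by simpa using Nat.le_of_succ_le_succ h)]
        simp [hc]

theorem pvReplace_single (a : Char) (r : List Char) (l : List Char) :
    PySem.Chars.replace l [a] r = l.flatMap (fun c => if c = a then r else [c]) := by
  simp [PySem.Chars.replace]
  rw [pvReplaceGo a r l.length l [] le_rfl]
  simp

-- endswith with a single character tests the last character
theorem pvEndswith_single (l : List Char) (a : Char) :
    PySem.Chars.endswith l [a] = decide (l.getLast? = some a) := by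
  have h : [a].isSuffixOf l = true ↔ l.getLast? = some a := by
    rw [List.isSuffixOf_iff_suffix]
    constructor
    · rintro ⟨t, rfl⟩; simp
    · intro h; rcases List.getLast?_eq_some_iff.mp h with ⟨l', rfl⟩; simp
  show [a].isSuffixOf l = _
  rw [Bool.eq_iff_iff, h]
  simp

theorem pvAcAfter_cons (c : Char) (ch : List Char) (ins ac : Bool) :
    pvAcAfter (c :: ch) ins ac = pvAcAfter ch ins (if ins then ac else decide (c = ':')) := by
  cases ins with
  | true => simp [pvAcAfter]
  | false =>
    cases ch with
    | nil => simp [pvAcAfter]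
    | cons d t => simp [pvAcAfter]

-- A over a chunk of non-special characters
theorem pvChunk (ins iv : Bool) :
    ∀ (chunk rest : List Char) (ac : Bool),
      (∀ c ∈ chunk, c ≠ '"' ∧ c ≠ '\\') →
      fixColonsALoop (chunk ++ rest) ins iv ac false =
        chunk.map (pvF ins iv) ++ fixColonsALoop rest ins iv (pvAcAfter chunk ins ac) false := by
  intro chunk
  induction chunk with
  | nil => intro rest ac _; simp [pvAcAfter]
  | cons c ch ih =>
    intro rest ac h
    have hc := h c (List.mem_cons_self)
    have hch : ∀ d ∈ ch, d ≠ '"' ∧ d ≠ '\\' := fun d hd => h d (List.mem_cons_of_mem _ hd)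
    rw [pvAcAfter_cons]
    by_cases hcol : c = ':' <;> cases ins <;> cases iv <;>
      simp [fixColonsALoop, hc.1, hc.2, hcol, pvF, ih _ _ hch]

-- the chunk's flattened output agrees between the two programs
theorem pvChunkFlat (chunk : List Char) (ins iv : Bool) :
    pvFlat (chunk.map (pvF ins iv)) = pvFlat (fixColonsBChunk chunk ins iv) := by
  have hL : pvFlat (chunk.map (pvF ins iv)) = chunk.flatMap (fun c => (pvF ins iv c).toList) := by
    simp [pvFlat, List.flatMap_def]; rfl
  cases hch : chunk.isEmpty with
  | true =>
    have h0 : chunk = [] := by simpa using hch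
    subst h0; simp [fixColonsBChunk, pvFlat]
  | false =>
    cases hiv : ins && iv with
    | true =>
      rw [hL]
      simp only [fixColonsBChunk, hch, hiv, Bool.false_eq_true, if_false, if_true]
      simp [pvFlat, pvReplace_single]
      congr 1
      funext c
      by_cases h : c = ':' <;> simp [pvF, hiv, h]
    | false =>
      rw [hL]
      simp only [fixColonsBChunk, hch, hiv, Bool.false_eq_true, if_false]
      simp [pvFlat]
      have hf : ∀ c, (pvF ins iv c).toList = [c] := by
        intro c; simp [pvF, hiv]
      simp [hf]

-- the after_c update agrees between the two programs
theorem pvAcB (chunk : List Char) (ins ac : Bool) :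
    pvAcAfter chunk ins ac = fixColonsBAc chunk ins ac := by
  cases hch : chunk.isEmpty with
  | true =>
    have : chunk = [] := by simpa using hch
    subst this; simp [pvAcAfter, fixColonsBAc]
  | false =>
    cases ins with
    | true => simp [pvAcAfter, fixColonsBAc, hch]
    | false => simp [pvAcAfter, fixColonsBAc, hch, pvEndswith_single]

theorem pvBNil (i v a : Bool) : fixColonsBLoop [] i v a = [] := by
  rw [fixColonsBLoop]
  simp [fixColonsBJ, fixColonsBChunk]

-- properties of the jump target j = fixColonsBJ cs
theorem pvJFacts (cs : List Char) :
    fixColonsBJ cs ≤ cs.length ∧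
    (∀ i (h : i < cs.length), i < fixColonsBJ cs → cs[i] ≠ '"' ∧ cs[i] ≠ '\\') ∧
    (∀ (h : fixColonsBJ cs < cs.length), cs[fixColonsBJ cs] = '"' ∨ cs[fixColonsBJ cs] = '\\') := by
  unfold fixColonsBJ
  rcases hq : PySem.List.index? cs '"' with _ | qq <;>
    rcases hb : PySem.List.index? cs '\\' with _ | bb <;> simp only []
  · have h1 := (PySem.List.index?_eq_none_iff cs '"').mp hq
    have h2 := (PySem.List.index?_eq_none_iff cs '\\').mp hb
    refine ⟨le_rfl, fun i h _ => ⟨?_, ?_⟩, fun h => absurd h (by omega)⟩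
    · intro he; exact h1 (he ▸ List.getElem_mem h)
    · intro he; exact h2 (he ▸ List.getElem_mem h)
  · have h1 := (PySem.List.index?_eq_none_iff cs '"').mp hq
    obtain ⟨hk, hv, hlt⟩ := PySem.List.getElem_of_index?_eq_some hb
    refine ⟨le_of_lt hk, fun i h hij => ⟨?_, hlt i hij⟩, fun h => Or.inr hv⟩
    · intro he; exact h1 (he ▸ List.getElem_mem h)
  · have h2 := (PySem.List.index?_eq_none_iff cs '\\').mp hb
    obtain ⟨hk, hv, hlt⟩ := PySem.List.getElem_of_index?_eq_some hq
    refine ⟨le_of_lt hk, fun i h hij => ⟨hlt i hij, ?_⟩, fun h => Or.inl hv⟩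
    · intro he; exact h2 (he ▸ List.getElem_mem h)
  · obtain ⟨hkq, hvq, hltq⟩ := PySem.List.getElem_of_index?_eq_some hq
    obtain ⟨hkb, hvb, hltb⟩ := PySem.List.getElem_of_index?_eq_some hb
    refine ⟨le_of_lt (lt_of_le_of_lt (min_le_left _ _) hkq),
      fun i h hij => ⟨hltq i (lt_of_lt_of_le hij (min_le_left _ _)),
                      hltb i (lt_of_lt_of_le hij (min_le_right _ _))⟩, fun h => ?_⟩
    rcases le_total qq bb with hle | hle
    · left; simp only [min_eq_left hle]; exact hvq
    · right; simp only [min_eq_right hle]; exact hvb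

-- main equivalence of the two loops, on flattened outputs
theorem pvMain : ∀ (n : Nat) (cs : List Char) (ins iv ac : Bool), cs.length ≤ n →
    (iv = true → ins = true) →
    pvFlat (fixColonsALoop cs ins iv ac false) = pvFlat (fixColonsBLoop cs ins iv ac) := by
  intro n
  induction n with
  | zero =>
    intro cs ins iv ac hlen _
    have h0 : cs = [] := List.length_eq_zero_iff.mp (Nat.le_zero.mp hlen)
    subst h0
    rw [pvBNil]; rfl
  | succ n ih =>
    intro cs ins iv ac hlen hinv
    obtain ⟨hjle, hnot, hat⟩ := pvJFacts cs
    have hchunkOK : ∀ c ∈ cs.take (fixColonsBJ cs), c ≠ '"' ∧ c ≠ '\\' := by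
      intro c hcmem
      obtain ⟨i, hi, hgi⟩ := List.getElem_of_mem hcmem
      have hi2 : i < cs.length ∧ i < fixColonsBJ cs := by
        have h3 : (cs.take (fixColonsBJ cs)).length = min (fixColonsBJ cs) cs.length :=
          List.length_take
        omega
      rw [List.getElem_take] at hgi
      exact hgi ▸ hnot i hi2.1 hi2.2
    have hA : fixColonsALoop cs ins iv ac false =
        (cs.take (fixColonsBJ cs)).map (pvF ins iv) ++
          fixColonsALoop (cs.drop (fixColonsBJ cs)) ins iv
            (pvAcAfter (cs.take (fixColonsBJ cs)) ins ac) false := by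
      conv_lhs => rw [← List.take_append_drop (fixColonsBJ cs) cs]
      exact pvChunk ins iv _ _ ac hchunkOK
    rw [hA, fixColonsBLoop]
    have hacb := pvAcB (cs.take (fixColonsBJ cs)) ins ac
    split
    case _ heq =>
      rw [heq]
      simp only [fixColonsALoop, List.append_nil]
      exact pvChunkFlat _ ins iv
    case _ c rest heq =>
      have hjlt : fixColonsBJ cs < cs.length := by
        have h1 : (cs.drop (fixColonsBJ cs)).length = cs.length - fixColonsBJ cs :=
          List.length_drop
        rw [heq] at h1; simp at h1; omega
      have hcj : cs[fixColonsBJ cs] = c := by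
        have h := congrArg List.head? heq
        rw [List.head?_drop] at h
        simpa [List.getElem?_eq_getElem hjlt] using h
      have hrestlen : rest.length + fixColonsBJ cs + 1 = cs.length := by
        have h1 : (cs.drop (fixColonsBJ cs)).length = cs.length - fixColonsBJ cs :=
          List.length_drop
        rw [heq] at h1; simp at h1; omega
      rcases hat hjlt with hcq | hcb
      · -- next special char is '"'
        have hcq' : c = '"' := hcj ▸ hcq
        subst hcq'
        rw [if_neg (by decide), heq]
        cases ins with
        | false =>
          rw [if_pos (by decide : (!false) = true)]
          cases hac : pvAcAfter (cs.take (fixColonsBJ cs)) false ac with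
          | true =>
            have hstep : fixColonsALoop ('"' :: rest) false iv true false
                = String.ofList ['"'] :: fixColonsALoop rest true true false false := by
              simp [fixColonsALoop]
            rw [hstep, ← hacb, hac, pvFlat_append, pvFlat_cons, pvFlat_append, pvFlat_append,
              pvChunkFlat _ false iv, ih rest true true false (by omega) (fun _ => rfl)]
            simp [pvFlat]
          | false =>
            have hiv : iv = false := by
              cases iv with
              | false => rfl
              | true => exact absurd (hinv rfl) (by simp)
            subst hiv
            have hstep : fixColonsALoop ('"' :: rest) false false false false
                = String.ofList ['"'] :: fixColonsALoop rest true false false false := by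
              simp [fixColonsALoop]
            rw [hstep, ← hacb, hac, pvFlat_append, pvFlat_cons, pvFlat_append, pvFlat_append,
              pvChunkFlat _ false false, ih rest true false false (by omega) (fun _ => rfl)]
            simp [pvFlat]
        | true =>
          rw [if_neg (by decide : ¬((!true) = true))]
          have hstep : fixColonsALoop ('"' :: rest) true iv
              (pvAcAfter (cs.take (fixColonsBJ cs)) true ac) false
              = String.ofList ['"'] :: fixColonsALoop rest false false
                  (pvAcAfter (cs.take (fixColonsBJ cs)) true ac) false := by
            simp [fixColonsALoop]
          rw [hstep, pvFlat_append, pvFlat_cons, pvFlat_append, pvFlat_append,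
            pvChunkFlat _ true iv, hacb,
            ih rest false false _ (by omega) (by simp)]
          simp [pvFlat]
      · -- next special char is '\'
        have hcb' : c = '\\' := hcj ▸ hcb
        subst hcb'
        rw [if_pos rfl, heq]
        cases rest with
        | nil =>
          have hstep : fixColonsALoop ['\\'] ins iv
              (pvAcAfter (cs.take (fixColonsBJ cs)) ins ac) false
              = [String.ofList ['\\']] := by
            simp [fixColonsALoop]
          rw [hstep, pvFlat_append, pvFlat_append, pvFlat_append,
            pvChunkFlat _ ins iv]
          simp [pvFlat, pvBNil]
        | cons d rest' =>
          have hstep : fixColonsALoop ('\\' :: d :: rest') ins iv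
              (pvAcAfter (cs.take (fixColonsBJ cs)) ins ac) false
              = String.ofList ['\\'] :: String.ofList [d] :: fixColonsALoop rest' ins iv
                  (pvAcAfter (cs.take (fixColonsBJ cs)) ins ac) false := by
            simp [fixColonsALoop]
          rw [hstep, hacb, pvFlat_append, pvFlat_cons, pvFlat_cons, pvFlat_append,
            pvFlat_append, pvChunkFlat _ ins iv,
            ih rest' ins iv _ (by simp at hrestlen ⊢; omega) hinv]
          simp [pvFlat]

theorem pvJoinNil (l : List (List Char)) : PySem.Chars.join [] l = l.flatten := by
  induction l with
  | nil => simp [PySem.Chars.join, List.intercalate]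
  | cons s t ih =>
    simp [PySem.Chars.join, List.intercalate] at ih ⊢
    cases t with
    | nil => simp
    | cons u v => simp_all [List.intersperse]

theorem pvJoinFlat (l : List String) :
    (PySem.Str.join "" l).toList = pvFlat l := by
  rw [PySem.Str.toList_join]
  show PySem.Chars.join [] _ = _
  rw [pvJoinNil]
  rfl

-- ===== VERDICT (by name: the statement is the Claim_ definition above) =====
theorem fix_colons_py_spec : Claim_equal_fix_colons_py := by
  intro s _
  unfold Spec_fix_colons_py fix_colons_py fix_colons_py_alt
  have h := pvMain s.toList.length s.toList false false false le_rfl (by simp)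
  apply String.toList_inj.mp
  rw [pvJoinFlat, pvJoinFlat, h]
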